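-- pv_equiv track=rewrite | github.com/kimsinhyun/CodingTest | 신현/programmers/level2/49_할인행사.py | solution
-- ===== SOURCE A (Python) =====
-- def compute(left):
--     temp = [val for idx, val in left.items()]
--     return sum(temp)
--
-- def solution(want, number, discount):
--     from collections import Counter
--     answer = 0
--     want_dict = dict()
--     for x,y in zip(want, number):
--         want_dict[x] = y
--
--     answer = []
--     for i in range(len(discount)-9):
--         left = Counter(want_dict) - Counter(discount[i:i+10])
--         total_left = compute(left)
--         answer.append(total_left)
--     temp = list(filter(lambda x: x==0, answer))
--     return len(temp)
-- ===== SOURCE B (Python) =====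
-- def solution(want, number, discount):
--     need = dict(zip(want, number))
--     n = len(discount)
--     if n < 10:
--         return 0
--     counts = {k: 0 for k in need}
--     for d in discount[:10]:
--         if d in counts:
--             counts[d] += 1
--     answer = 0
--     if all(counts[k] >= v for k, v in need.items()):
--         answer += 1
--     for j in range(10, n):
--         if discount[j] in counts:
--             counts[discount[j]] += 1
--         if discount[j - 10] in counts:
--             counts[discount[j - 10]] -= 1
--         if all(counts[k] >= v for k, v in need.items()):
--             answer += 1
--     return answer
-- ===== Notes on version B (the rewrite author's own statement) =====
-- stated objective: faster
-- what changed: Instead of rebuilding a Counter of every 10-day window and summing the positive leftovers of a Counter subtraction, B keeps one sliding count dict (increment the incoming day, decrement the outgoing day) and per window checks all wanted thresholds directly.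
import Mathlib
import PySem

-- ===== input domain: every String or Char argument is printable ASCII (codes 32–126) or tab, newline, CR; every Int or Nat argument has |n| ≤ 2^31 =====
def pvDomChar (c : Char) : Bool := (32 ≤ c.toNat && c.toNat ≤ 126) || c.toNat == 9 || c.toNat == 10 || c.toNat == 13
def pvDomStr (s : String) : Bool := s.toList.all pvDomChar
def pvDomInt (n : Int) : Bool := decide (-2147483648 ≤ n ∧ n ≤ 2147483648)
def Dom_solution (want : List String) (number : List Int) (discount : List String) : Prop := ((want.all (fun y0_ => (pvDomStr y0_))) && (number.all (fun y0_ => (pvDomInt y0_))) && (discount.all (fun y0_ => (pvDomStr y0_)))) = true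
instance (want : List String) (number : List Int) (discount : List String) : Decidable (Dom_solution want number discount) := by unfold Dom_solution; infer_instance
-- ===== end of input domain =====

-- B replaces A's per-window Counter rebuild + Counter subtraction + leftover sum by one sliding
-- count dict updated per day, checking the wanted thresholds per window (a single incremental pass).

-- ===== PORT A =====
-- Counter(want_dict) - Counter(window) keeps exactly the keys of want_dict whose leftover count
-- is positive (keys only in the window get a non-positive count and are dropped by Counter.__sub__);
-- compute(left) sums the leftover values.
def solution (want : List String) (number : List Int) (discount : List String) : Int :=
  let want_dict : PySem.Dict String Int :=
    (want.zip number).foldl (fun d p => d.insert p.1 p.2) PySem.Dict.empty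
  let answer : List Int :=
    (PySem.List.pyRange 0 ((discount.length : Int) - 9) 1).map (fun i =>
      let window := PySem.List.slice discount (some i) (some (i + 10))
      let left : List (String × Int) :=
        want_dict.items.filterMap (fun p =>
          if 0 < p.2 - (window.count p.1 : Int) then some (p.1, p.2 - (window.count p.1 : Int)) else none)
      (left.map (fun p => p.2)).sum)
  ((answer.filter (fun x => x == 0)).length : Int)

-- ===== PORT B =====
def solution_alt (want : List String) (number : List Int) (discount : List String) : Int :=
  let need : PySem.Dict String Int :=
    (want.zip number).foldl (fun d p => d.insert p.1 p.2) PySem.Dict.empty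
  if (discount.length : Int) < 10 then 0 else
    let counts0 : PySem.Dict String Int := need.keys.foldl (fun d k => d.insert k 0) PySem.Dict.empty
    let counts1 : PySem.Dict String Int :=
      (PySem.List.slice discount none (some 10)).foldl
        (fun c d => if c.contains d then c.modify d 0 (· + 1) else c) counts0
    let answer0 : Int := if need.items.all (fun p => counts1.getD p.1 0 ≥ p.2) then 1 else 0
    ((PySem.List.pyRange 10 (discount.length : Int) 1).foldl
        (fun (st : PySem.Dict String Int × Int) j =>
          let din := PySem.List.pyGetD discount j ""
          let c1 := if st.1.contains din then st.1.modify din 0 (· + 1) else st.1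
          let dout := PySem.List.pyGetD discount (j - 10) ""
          let c2 := if c1.contains dout then c1.modify dout 0 (· - 1) else c1
          (c2, st.2 + (if need.items.all (fun p => c2.getD p.1 0 ≥ p.2) then 1 else 0)))
        (counts1, answer0)).2

-- ===== PRECONDITION & SPEC =====
def Spec_solution (want : List String) (number : List Int) (discount : List String) (out : Int) : Prop := out = solution_alt want number discount
instance (want : List String) (number : List Int) (discount : List String) (out : Int) : Decidable (Spec_solution want number discount out) := by unfold Spec_solution; infer_instance

-- ===== CLAIM (what is proved, stated in full; the proofs are below) =====
def Claim_equal_solution : Prop := ∀ (want : List String) (number : List Int) (discount : List String), Dom_solution want number discount → Spec_solution want number discount (solution want number discount)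

-- ===== LEMMAS AND PROOFS =====

-- the 10-day window starting at day w, and "every wanted threshold met in that window"
def pvWin (discount : List String) (w : Nat) : List String := (discount.drop w).take 10
def pvGood (need : PySem.Dict String Int) (discount : List String) (w : Nat) : Bool :=
  need.items.all (fun p => ((pvWin discount w).count p.1 : Int) ≥ p.2)

lemma pv_all_congr {α : Type} (l : List α) (p q : α → Bool) (h : ∀ x ∈ l, p x = q x) :
    l.all p = l.all q := by
  induction l with
  | nil => rfl
  | cons x t ih =>
    simp only [List.all_cons, h x (by simp), ih (fun y hy => h y (by simp [hy]))]

-- A side: the leftover sum is zero iff every threshold is met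
lemma pv_sum_nonneg (l : List (String × Int)) (c : String → Int) :
    0 ≤ ((l.filterMap (fun p =>
      if 0 < p.2 - c p.1 then some (p.1, p.2 - c p.1) else none)).map (fun p => p.2)).sum := by
  induction l with
  | nil => simp
  | cons p t ih =>
    by_cases hp : 0 < p.2 - c p.1
    · simp only [List.filterMap_cons, if_pos hp, List.map_cons, List.sum_cons]; omega
    · simpa only [List.filterMap_cons, if_neg hp] using ih

lemma pv_sum_eq_zero_iff (l : List (String × Int)) (c : String → Int) :
    (((l.filterMap (fun p =>
      if 0 < p.2 - c p.1 then some (p.1, p.2 - c p.1) else none)).map (fun p => p.2)).sum = 0)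
    ↔ (l.all (fun p => c p.1 ≥ p.2) = true) := by
  induction l with
  | nil => simp
  | cons p t ih =>
    by_cases hp : 0 < p.2 - c p.1
    · have h0 := pv_sum_nonneg t c
      simp only [List.filterMap_cons, if_pos hp, List.map_cons, List.sum_cons, List.all_cons,
        Bool.and_eq_true, ge_iff_le, decide_eq_true_eq]
      constructor
      · intro he; exfalso; omega
      · rintro ⟨hle, -⟩; omega
    · have hle : c p.1 ≥ p.2 := by omega
      simp only [List.filterMap_cons, if_neg hp, List.all_cons, Bool.and_eq_true, ge_iff_le,
        decide_eq_true_eq, ih]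
      exact ⟨fun h => ⟨hle, h⟩, fun ⟨_, h⟩ => h⟩

-- B side: the guarded counting fold over the initial window
lemma pv_gfold_contains (l : List String) (d : PySem.Dict String Int) (k : String) :
    ((l.foldl (fun c x => if c.contains x then c.modify x 0 (· + 1) else c) d).contains k)
      = d.contains k := by
  induction l generalizing d with
  | nil => rfl
  | cons x t ih =>
    simp only [List.foldl_cons]
    by_cases hx : d.contains x = true
    · rw [if_pos hx, ih]
      rw [PySem.Dict.contains_modify]
      by_cases hkx : k = x
      · subst hkx; simp [hx]
      · have : (k == x) = false := beq_eq_false_iff_ne.mpr hkx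
        simp [this]
    · rw [if_neg hx, ih]

lemma pv_gfold_getD (l : List String) (d : PySem.Dict String Int) (k : String)
    (h : d.contains k = true) :
    ((l.foldl (fun c x => if c.contains x then c.modify x 0 (· + 1) else c) d).getD k 0)
      = d.getD k 0 + (l.count k : Int) := by
  induction l generalizing d with
  | nil => simp
  | cons x t ih =>
    simp only [List.foldl_cons, List.count_cons]
    by_cases hx : d.contains x = true
    · rw [if_pos hx, ih _ (by rw [PySem.Dict.contains_modify]; simp [h])]
      rw [PySem.Dict.getD_modify]
      by_cases hkx : k = x
      · subst hkx; simp; omega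
      · have hb : (x == k) = false := beq_eq_false_iff_ne.mpr (Ne.symm hkx)
        simp [hkx, hb]
    · rw [if_neg hx, ih _ h]
      have hkx : k ≠ x := fun he => hx (he ▸ h)
      have hb : (x == k) = false := beq_eq_false_iff_ne.mpr (Ne.symm hkx)
      simp [hb]

-- B side: the zero-initialisation fold for counts0
lemma pv_insfold_contains (L : List String) (d : PySem.Dict String Int) (k : String) :
    ((L.foldl (fun d k => d.insert k 0) d).contains k) = (d.contains k || decide (k ∈ L)) := by
  induction L generalizing d with
  | nil => simp
  | cons x t ih =>
    simp only [List.foldl_cons, ih, PySem.Dict.contains_insert, List.mem_cons]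
    by_cases hkx : k = x
    · subst hkx; simp
    · have hb : (k == x) = false := beq_eq_false_iff_ne.mpr hkx
      simp [hkx, hb]

lemma pv_insfold_getD (L : List String) (d : PySem.Dict String Int) (k : String)
    (h : d.getD k 0 = 0) :
    ((L.foldl (fun d k => d.insert k 0) d).getD k 0) = 0 := by
  induction L generalizing d with
  | nil => exact h
  | cons x t ih =>
    simp only [List.foldl_cons]
    refine ih _ ?_
    rw [PySem.Dict.getD_insert]
    split <;> simp [h]

-- sliding the window one day forward
lemma pv_win_slide (discount : List String) (w : Nat) (h : w + 10 < discount.length) (k : String) :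
    ((pvWin discount (w + 1)).count k : Int)
      = ((pvWin discount w).count k : Int)
        - (if discount[w]'(by omega) = k then 1 else 0)
        + (if discount[w + 10]'h = k then 1 else 0) := by
  have hw : w < discount.length := by omega
  have h1 : pvWin discount w = discount[w] :: (discount.drop (w + 1)).take 9 := by
    unfold pvWin
    rw [List.drop_eq_getElem_cons hw]
    rfl
  have hg : (discount.drop (w + 1))[9]? = some (discount[w + 10]'h) := by
    rw [List.getElem?_drop]
    exact List.getElem?_eq_getElem (by omega)
  have h2 : pvWin discount (w + 1)
      = (discount.drop (w + 1)).take 9 ++ [discount[w + 10]'h] := by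
    unfold pvWin
    have he : List.take 10 (discount.drop (w + 1)) = List.take (9 + 1) (discount.drop (w + 1)) := rfl
    rw [he, List.take_add_one, hg]
    rfl
  rw [h1, h2, List.count_append, List.count_cons]
  simp only [List.count_cons, List.count_nil, beq_iff_eq]
  by_cases e1 : discount[w] = k <;> by_cases e2 : discount[w + 10]'h = k <;>
    simp [e1, e2]

-- one guarded modify step keeps the key set and acts pointwise on values
lemma pv_step_contains (d need : PySem.Dict String Int) (x : String) (f : Int → Int)
    (hc : ∀ k, d.contains k = need.contains k) (k : String) :
    ((if d.contains x then d.modify x 0 f else d).contains k) = need.contains k := by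
  by_cases hx : d.contains x = true
  · rw [if_pos hx, PySem.Dict.contains_modify]
    by_cases hkx : k = x
    · subst hkx
      have hnk : need.contains k = true := hc k ▸ hx
      simp [hnk]
    · have hb : (k == x) = false := beq_eq_false_iff_ne.mpr hkx
      rw [hb, Bool.false_or, hc]
  · rw [if_neg hx]; exact hc k

lemma pv_step_getD (d need : PySem.Dict String Int) (x : String) (f : Int → Int)
    (hc : ∀ k, d.contains k = need.contains k) (k : String) (hk : need.contains k = true) :
    ((if d.contains x then d.modify x 0 f else d).getD k 0)
      = if k = x then f (d.getD k 0) else d.getD k 0 := by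
  by_cases hx : d.contains x = true
  · rw [if_pos hx, PySem.Dict.getD_modify]
    by_cases hkx : k = x
    · subst hkx; simp
    · simp [hkx]
  · rw [if_neg hx]
    have hkx : k ≠ x := by
      intro he; subst he
      rw [hc k, hk] at hx
      exact hx rfl
    rw [if_neg hkx]

-- the main loop invariant of B
set_option maxHeartbeats 1000000 in
lemma pv_loop (need : PySem.Dict String Int) (discount : List String) :
    ∀ (m : Nat) (a : Int) (st : PySem.Dict String Int × Int),
    10 ≤ a → a ≤ (discount.length : Int) → ((discount.length : Int) - a).toNat = m →
    (∀ k, st.1.contains k = need.contains k) →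
    (∀ k, need.contains k = true →
        st.1.getD k 0 = ((pvWin discount (a.toNat - 10)).count k : Int)) →
    st.2 = ((PySem.List.pyRange 0 (a - 9) 1).countP (fun i => pvGood need discount i.toNat) : Int) →
    ((PySem.List.pyRange a (discount.length : Int) 1).foldl
        (fun (st : PySem.Dict String Int × Int) j =>
          let din := PySem.List.pyGetD discount j ""
          let c1 := if st.1.contains din then st.1.modify din 0 (· + 1) else st.1
          let dout := PySem.List.pyGetD discount (j - 10) ""
          let c2 := if c1.contains dout then c1.modify dout 0 (· - 1) else c1
          (c2, st.2 + (if need.items.all (fun p => c2.getD p.1 0 ≥ p.2) then 1 else 0)))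
        st).2
      = ((PySem.List.pyRange 0 ((discount.length : Int) - 9) 1).countP
          (fun i => pvGood need discount i.toNat) : Int) := by
  intro m
  induction m with
  | zero =>
    intro a st ha han hm hc hv hans
    have : a = (discount.length : Int) := by omega
    subst this
    rw [PySem.List.pyRange_one_eq_nil (le_refl _)]
    simpa using hans
  | succ m ih =>
    intro a st ha han hm hc hv hans
    have halt : a < (discount.length : Int) := by omega
    rw [PySem.List.pyRange_one_cons halt, List.foldl_cons]
    set w : Nat := a.toNat - 10 with hwdef
    have hw10 : w + 10 = a.toNat := by omega
    have hwlt : w + 10 < discount.length := by omega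
    have hdin : PySem.List.pyGetD discount a "" = discount[w + 10]'hwlt := by
      rw [PySem.List.pyGetD_eq_getElem discount "" (by omega) (by exact_mod_cast halt)]
      congr 1
      omega
    have hdout : PySem.List.pyGetD discount (a - 10) "" = discount[w]'(by omega) := by
      rw [PySem.List.pyGetD_eq_getElem discount "" (by omega) (by omega)]
      congr 1
      omega
    have hkey : ∀ k, need.contains k = true →
        ((if (if st.1.contains (PySem.List.pyGetD discount a "") then
              st.1.modify (PySem.List.pyGetD discount a "") 0 (· + 1) else st.1).contains
                (PySem.List.pyGetD discount (a - 10) "") then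
            (if st.1.contains (PySem.List.pyGetD discount a "") then
              st.1.modify (PySem.List.pyGetD discount a "") 0 (· + 1) else st.1).modify
                (PySem.List.pyGetD discount (a - 10) "") 0 (· - 1)
          else (if st.1.contains (PySem.List.pyGetD discount a "") then
              st.1.modify (PySem.List.pyGetD discount a "") 0 (· + 1) else st.1)).getD k 0)
          = ((pvWin discount (w + 1)).count k : Int) := by
      intro k hk
      simp only [hdin, hdout]
      rw [pv_step_getD _ need _ _ (fun k' => pv_step_contains _ need _ _ hc k') k hk]
      rw [pv_step_getD _ need _ _ hc k hk]
      rw [pv_win_slide discount w hwlt k, hv k hk]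
      have r1 : (if discount[w]'(by omega) = k then (1:Int) else 0)
          = if k = discount[w]'(by omega) then 1 else 0 := by
        by_cases h : k = discount[w]'(by omega)
        · rw [if_pos h, if_pos h.symm]
        · rw [if_neg (fun hh => h hh.symm), if_neg h]
      have r2 : (if discount[w + 10]'hwlt = k then (1:Int) else 0)
          = if k = discount[w + 10]'hwlt then 1 else 0 := by
        by_cases h : k = discount[w + 10]'hwlt
        · rw [if_pos h, if_pos h.symm]
        · rw [if_neg (fun hh => h hh.symm), if_neg h]
      rw [r1, r2]
      split_ifs <;> omega
    refine ih (a + 1) _ (by omega) (by omega) (by omega) ?_ ?_ ?_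
    · -- contains preserved
      intro k
      simp only [hdin, hdout]
      exact pv_step_contains _ need _ _
        (fun k' => pv_step_contains _ need _ _ hc k') k
    · -- counts track the new window
      intro k hk
      have hnw : (a + 1).toNat - 10 = w + 1 := by omega
      rw [hnw]
      exact hkey k hk
    · -- the answer accumulates the new window's verdict
      simp only []
      rw [hans]
      have hsplit : PySem.List.pyRange 0 (a + 1 - 9) 1
          = PySem.List.pyRange 0 (a - 9) 1 ++ [a - 9] := by
        have h9 : a + 1 - 9 = (a - 9) + 1 := by ring
        rw [h9, PySem.List.pyRange_one_succ_right (by omega)]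
      rw [hsplit, List.countP_append]
      have hna : (a - 9).toNat = w + 1 := by omega
      have hgood : (need.items.all (fun p =>
            ((if (if st.1.contains (PySem.List.pyGetD discount a "") then
                  st.1.modify (PySem.List.pyGetD discount a "") 0 (· + 1) else st.1).contains
                    (PySem.List.pyGetD discount (a - 10) "") then
                (if st.1.contains (PySem.List.pyGetD discount a "") then
                  st.1.modify (PySem.List.pyGetD discount a "") 0 (· + 1) else st.1).modify
                    (PySem.List.pyGetD discount (a - 10) "") 0 (· - 1)
              else (if st.1.contains (PySem.List.pyGetD discount a "") then
                  st.1.modify (PySem.List.pyGetD discount a "") 0 (· + 1) else st.1)).getD p.1 0 ≥ p.2)))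
          = pvGood need discount (a - 9).toNat := by
        unfold pvGood
        refine pv_all_congr _ _ _ ?_
        intro p hp
        have hk : need.contains p.1 = true :=
          (PySem.Dict.contains_iff_mem_keys need p.1).mpr (PySem.Dict.mem_keys_of_mem_items need hp)
        rw [hkey p.1 hk, hna]
      rw [List.countP_cons, List.countP_nil]
      simp only [hgood]
      push_cast
      by_cases hg : pvGood need discount (a - 9).toNat = true <;> simp [hg]


-- initial window: counts1 has need's keys and counts the first 10 days
lemma pv_init_contains (need : PySem.Dict String Int) (discount : List String) (k : String) :
    (((PySem.List.slice discount none (some 10)).foldl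
        (fun c d => if c.contains d then c.modify d 0 (· + 1) else c)
        (need.keys.foldl (fun d k => d.insert k 0) (PySem.Dict.empty : PySem.Dict String Int))).contains k)
      = need.contains k := by
  rw [pv_gfold_contains, pv_insfold_contains, PySem.Dict.contains_empty, Bool.false_or,
    ← PySem.Dict.contains_eq_decide_mem_keys]

lemma pv_init_getD (need : PySem.Dict String Int) (discount : List String) (k : String)
    (hk : need.contains k = true) :
    (((PySem.List.slice discount none (some 10)).foldl
        (fun c d => if c.contains d then c.modify d 0 (· + 1) else c)
        (need.keys.foldl (fun d k => d.insert k 0) (PySem.Dict.empty : PySem.Dict String Int))).getD k 0)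
      = ((pvWin discount 0).count k : Int) := by
  have hck : ((need.keys.foldl (fun d k => d.insert k 0) (PySem.Dict.empty : PySem.Dict String Int)).contains k) = true := by
    rw [pv_insfold_contains, PySem.Dict.contains_empty, Bool.false_or, decide_eq_true_eq]
    exact (PySem.Dict.contains_iff_mem_keys need k).mp hk
  rw [pv_gfold_getD _ _ _ hck, pv_insfold_getD _ _ _ (PySem.Dict.getD_empty _ _), zero_add]
  have hsl : PySem.List.slice discount none (some 10) = pvWin discount 0 := by
    rw [PySem.List.slice_to discount (by norm_num)]
    unfold pvWin
    rw [List.drop_zero]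
    rfl
  rw [hsl]

-- A's window value is zero exactly on the good windows
lemma pv_A_countP (need : PySem.Dict String Int) (discount : List String) :
    (((PySem.List.pyRange 0 ((discount.length : Int) - 9) 1).map (fun i =>
        ((need.items.filterMap (fun p =>
          if 0 < p.2 - ((PySem.List.slice discount (some i) (some (i + 10))).count p.1 : Int)
          then some (p.1, p.2 - ((PySem.List.slice discount (some i) (some (i + 10))).count p.1 : Int))
          else none)).map (fun p => p.2)).sum)).filter (fun x => x == 0)).length
      = (PySem.List.pyRange 0 ((discount.length : Int) - 9) 1).countP
          (fun i => pvGood need discount i.toNat) := by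
  rw [← List.countP_eq_length_filter, List.countP_map]
  refine List.countP_congr ?_
  intro i hi
  have hmem := (PySem.List.mem_pyRange_one).mp hi
  have hsl : PySem.List.slice discount (some i) (some (i + 10)) = pvWin discount i.toNat := by
    rw [PySem.List.slice_toNat discount (by omega) (by omega)]
    unfold pvWin
    congr 1
    omega
  simp only [Function.comp_apply, hsl]
  have h2 := pv_sum_eq_zero_iff need.items (fun k => ((pvWin discount i.toNat).count k : Int))
  unfold pvGood
  constructor
  · intro h
    exact h2.mp (by simpa using h)
  · intro h
    simpa using h2.mpr h

set_option maxHeartbeats 1000000 in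
theorem solution_spec : Claim_equal_solution := by
  intro want number discount _
  show solution want number discount = solution_alt want number discount
  simp only [solution, solution_alt]
  by_cases hn : (discount.length : Int) < 10
  · rw [if_pos hn]
    rw [PySem.List.pyRange_one_eq_nil (by omega)]
    simp
  · rw [if_neg hn]
    rw [pv_A_countP]
    refine (pv_loop ((want.zip number).foldl (fun d p => d.insert p.1 p.2) PySem.Dict.empty) discount ((discount.length : Int) - 10).toNat 10 _
      (le_refl _) (by omega) (by omega) ?_ ?_ ?_).symm
    · intro k
      exact pv_init_contains ((want.zip number).foldl (fun d p => d.insert p.1 p.2) PySem.Dict.empty) discount k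
    · intro k hk
      have h0 : (10 : Int).toNat - 10 = 0 := by norm_num
      rw [h0]
      exact pv_init_getD ((want.zip number).foldl (fun d p => d.insert p.1 p.2) PySem.Dict.empty) discount k hk
    · show (if _ = true then (1:Int) else 0) = _
      have h1 : (10 : Int) - 9 = 0 + 1 := by norm_num
      rw [h1, PySem.List.pyRange_one_succ_right (le_refl 0), PySem.List.pyRange_one_eq_nil (le_refl 0)]
      rw [List.nil_append, List.countP_cons, List.countP_nil]
      have hall : ((want.zip number).foldl (fun d p => d.insert p.1 p.2) PySem.Dict.empty).items.all
            (fun p => (((PySem.List.slice discount none (some 10)).foldl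
              (fun c d => if c.contains d then c.modify d 0 (· + 1) else c)
              ((((want.zip number).foldl (fun d p => d.insert p.1 p.2) PySem.Dict.empty)).keys.foldl
                (fun d k => d.insert k 0) PySem.Dict.empty)).getD p.1 0 ≥ p.2))
          = pvGood ((want.zip number).foldl (fun d p => d.insert p.1 p.2) PySem.Dict.empty) discount ((0:Int).toNat) := by
        unfold pvGood
        refine pv_all_congr _ _ _ ?_
        intro p hp
        have hk : ((want.zip number).foldl (fun d p => d.insert p.1 p.2) PySem.Dict.empty).contains p.1 = true :=
          (PySem.Dict.contains_iff_mem_keys _ p.1).mpr (PySem.Dict.mem_keys_of_mem_items _ hp)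
        rw [pv_init_getD _ discount p.1 hk]
        rfl
      rw [hall]
      cases hgb : pvGood ((want.zip number).foldl (fun d p => d.insert p.1 p.2) PySem.Dict.empty) discount ((0:Int).toNat) <;> simp
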